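-- pv_equiv track=rewrite | github.com/mlabeeb03/codeforces | Accommodation.py | findlow
-- ===== SOURCE A (Python) =====
-- def findlow(arr):
--     n = len(arr)
--     curr = arr.count(1)
--     i = 0
--     tb = 0
--     while i + 1 < n and tb < n // 4:
--         if arr[i] == 1 and arr[i + 1] == 1:
--             curr -= 1
--             i += 2
--             tb += 1
--         else:
--             i += 1
--     return curr
-- ===== SOURCE B (Python) =====
-- def findlow(arr):
--     n = len(arr)
--     s = ''.join('1' if x == 1 else '.' for x in arr)
--     pairs = sum(len(run) // 2 for run in s.split('.'))
--     return arr.count(1) - min(pairs, n // 4)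
-- ===== Notes on version B (the rewrite author's own statement) =====
-- stated objective: alternative
-- what changed: Replaces A's index-skipping capped while loop by a staged pipeline: encode the array as a '1'/'.' string, split it on '.' into the maximal runs of ones, take a closed form len(run)//2 per run, and apply the n//4 cap once at the end via min.
import Mathlib
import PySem

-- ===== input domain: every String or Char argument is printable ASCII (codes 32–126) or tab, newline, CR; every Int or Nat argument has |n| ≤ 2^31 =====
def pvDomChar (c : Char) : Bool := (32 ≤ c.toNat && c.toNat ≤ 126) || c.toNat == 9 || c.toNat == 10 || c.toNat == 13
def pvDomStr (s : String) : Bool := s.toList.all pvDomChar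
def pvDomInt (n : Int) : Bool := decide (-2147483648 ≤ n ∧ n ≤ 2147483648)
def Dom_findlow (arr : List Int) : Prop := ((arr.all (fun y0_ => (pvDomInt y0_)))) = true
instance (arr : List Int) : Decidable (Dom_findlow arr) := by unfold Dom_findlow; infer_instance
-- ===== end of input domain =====

-- B replaces A's index-skipping capped while loop by a staged pipeline: encode as a '1'/'.' string,
-- split on '.' into maximal runs of ones, sum the closed form len(run)//2, cap once via min.


-- ===== PORT A =====
-- the while loop: i and tb advance as in the Python; arr[i] via pyGet? (always in range here)
def findlowLoop (arr : List Int) (n curr i tb : Int) : Int :=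
  if h : i + 1 < n ∧ tb < PySem.Int.floordiv n 4 then
    if ((PySem.List.pyGet? arr i).getD 0 = 1 ∧ (PySem.List.pyGet? arr (i + 1)).getD 0 = 1) then
      findlowLoop arr n (curr - 1) (i + 2) (tb + 1)
    else
      findlowLoop arr n curr (i + 1) tb
  else curr
termination_by (n - i).toNat
decreasing_by all_goals omega

def findlow (arr : List Int) : Int :=
  let n : Int := arr.length
  let curr : Int := arr.count 1
  findlowLoop arr n curr 0 0

-- ===== PORT B =====
-- s = ''.join('1' if x == 1 else '.' for x in arr) is the list of these chars;
-- s.split('.') for the one-char separator '.' is exactly List.splitOn '.' on that char list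
def findlow_alt (arr : List Int) : Int :=
  let n : Int := arr.length
  let s : List Char := arr.map (fun x => if x = 1 then '1' else '.')
  let pairs : Int := ((s.splitOn '.').map (fun run => PySem.Int.floordiv (run.length : Int) 2)).sum
  (arr.count 1 : Int) - min pairs (PySem.Int.floordiv n 4)

-- ===== PRECONDITION & SPEC =====
def Spec_findlow (arr : List Int) (out : Int) : Prop := out = findlow_alt arr
instance (arr : List Int) (out : Int) : Decidable (Spec_findlow arr out) := by unfold Spec_findlow; infer_instance

-- ===== CLAIM (what is proved, stated in full; the proofs are below) =====
def Claim_equal_findlow : Prop := ∀ (arr : List Int), Dom_findlow arr → Spec_findlow arr (findlow arr)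

-- ===== LEMMAS AND PROOFS =====

-- total number of greedy adjacent-1 pairs in a list
def gpairs : List Int → Int
  | [] => 0
  | [_] => 0
  | a :: b :: t => if a = 1 ∧ b = 1 then 1 + gpairs t else gpairs (b :: t)

theorem gpairs_nonneg (l : List Int) : 0 ≤ gpairs l := by
  induction l using gpairs.induct with
  | case1 => simp [gpairs]
  | case2 => simp [gpairs]
  | case3 a b t h ih => simp [gpairs, h]; omega
  | case4 a b t h ih => simpa [gpairs, h] using ih

theorem gpairs_cons_ne (x : Int) (t : List Int) (hx : x ≠ 1) :
    gpairs (x :: t) = gpairs t := by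
  cases t with
  | nil => simp [gpairs]
  | cons b t' => simp [gpairs, hx]

theorem splitOnP_ne_nil {α : Type} (p : α → Bool) (l : List α) : List.splitOnP p l ≠ [] := by
  induction l with
  | nil => simp [List.splitOnP_nil]
  | cons x t ih =>
    rw [List.splitOnP_cons]
    split_ifs
    · simp
    · cases h : List.splitOnP p t with
      | nil => exact absurd h ih
      | cons r rs => simp

-- B's per-run sum over the split equals the greedy pair count
theorem pairs_split (l : List Int) :
    (((l.map (fun x => if x = 1 then '1' else '.')).splitOn '.').map
      (fun run => PySem.Int.floordiv (run.length : Int) 2)).sum = gpairs l := by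
  induction l using gpairs.induct with
  | case1 => simp [List.splitOn, List.splitOnP_nil, gpairs, PySem.Int.floordiv]
  | case2 a =>
    by_cases ha : a = 1 <;>
      simp [List.splitOn, List.splitOnP_cons, List.splitOnP_nil, ha, gpairs]
  | case3 a b t h ih =>
    obtain ⟨ha, hb⟩ := h
    subst ha; subst hb
    cases hS : List.splitOnP (fun x => x == '.') (t.map (fun x => if x = 1 then '1' else '.')) with
    | nil => exact absurd hS (splitOnP_ne_nil _ _)
    | cons r rs =>
      simp only [List.splitOn] at ih hS
      simp [pysem, List.splitOn, List.splitOnP_cons, hS, gpairs] at ih ⊢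
      omega
  | case4 a b t h ih =>
    by_cases ha : a = 1
    · subst ha
      have hb : b ≠ 1 := fun hb => h ⟨rfl, hb⟩
      cases hS : List.splitOnP (fun x => x == '.') (t.map (fun x => if x = 1 then '1' else '.')) with
      | nil => exact absurd hS (splitOnP_ne_nil _ _)
      | cons r rs =>
        simp only [List.splitOn] at ih hS
        simp [pysem, List.splitOn, List.splitOnP_cons, hS, hb, gpairs_cons_ne b t hb] at ih ⊢
        have : gpairs (1 :: b :: t) = gpairs t := by
          simp [gpairs, hb, gpairs_cons_ne b t hb]
        omega
    · simp only [List.splitOn, List.map_cons] at ih ⊢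
      rw [show ((if a = 1 then '1' else '.') : Char) = '.' from by simp [ha]]
      rw [List.splitOnP_cons]
      simpa [gpairs_cons_ne a (b :: t) ha,
        show PySem.Int.floordiv 0 2 = 0 from by decide] using ih

-- the while loop equals curr - min (gpairs of the remaining suffix) (remaining cap)
theorem findlowLoop_eq (arr : List Int) :
    ∀ k (i tb curr : Int), (arr.length - i).toNat = k → 0 ≤ i → 0 ≤ tb →
    tb ≤ PySem.Int.floordiv (arr.length : Int) 4 →
    findlowLoop arr (arr.length : Int) curr i tb
      = curr - min (gpairs (arr.drop i.toNat)) (PySem.Int.floordiv (arr.length : Int) 4 - tb) := by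
  intro k
  induction k using Nat.strong_induction_on with
  | _ k ih =>
    intro i tb curr hk hi htb hcap
    rw [findlowLoop]
    by_cases hcond : i + 1 < (arr.length : Int) ∧ tb < PySem.Int.floordiv (arr.length : Int) 4
    · rw [dif_pos hcond]
      obtain ⟨hlt, htlt⟩ := hcond
      have hidx : i.toNat + 1 < arr.length := by omega
      obtain ⟨a, b, rest, hdrop⟩ : ∃ a b rest, arr.drop i.toNat = a :: b :: rest := by
        have h2 : 2 ≤ (arr.drop i.toNat).length := by
          rw [List.length_drop]; omega
        match hh : arr.drop i.toNat with
        | [] => rw [hh] at h2; simp at h2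
        | [x] => rw [hh] at h2; simp at h2
        | a :: b :: rest => exact ⟨a, b, rest, rfl⟩
      have hga : PySem.List.pyGet? arr i = some a := by
        rw [PySem.List.pyGet?_of_nonneg arr hi]
        have : arr[i.toNat]? = (arr.drop i.toNat)[0]? := by
          simp [List.getElem?_drop]
        rw [this, hdrop]; rfl
      have hgb : PySem.List.pyGet? arr (i + 1) = some b := by
        rw [PySem.List.pyGet?_of_nonneg arr (by omega : (0:Int) ≤ i + 1)]
        have h1 : (i + 1).toNat = i.toNat + 1 := by omega
        have : arr[i.toNat + 1]? = (arr.drop i.toNat)[1]? := by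
          simp [List.getElem?_drop]
        rw [h1, this, hdrop]; rfl
      by_cases hab : a = 1 ∧ b = 1
      · rw [if_pos (by rw [hga, hgb]; simpa using hab)]
        have hd2 : arr.drop (i + 2).toNat = rest := by
          have : (i + 2).toNat = i.toNat + 2 := by omega
          rw [this, ← List.drop_drop, hdrop]
          rfl
        rw [ih (arr.length - (i + 2)).toNat (by omega) (i + 2) (tb + 1) (curr - 1) rfl
            (by omega) (by omega) (by omega), hd2, hdrop]
        have hgr := gpairs_nonneg rest
        simp only [gpairs, if_pos hab]
        omega
      · rw [if_neg (by rw [hga, hgb]; simpa using hab)]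
        have hd1 : arr.drop (i + 1).toNat = b :: rest := by
          have : (i + 1).toNat = i.toNat + 1 := by omega
          rw [this, ← List.drop_drop, hdrop]
          rfl
        rw [ih (arr.length - (i + 1)).toNat (by omega) (i + 1) tb curr rfl
            (by omega) htb hcap, hd1, hdrop]
        simp only [gpairs, if_neg hab]
    · rw [dif_neg hcond]
      push Not at hcond
      by_cases hlen : i + 1 < (arr.length : Int)
      · have htbe : tb = PySem.Int.floordiv (arr.length : Int) 4 := le_antisymm hcap (hcond hlen)
        have := gpairs_nonneg (arr.drop i.toNat)
        omega
      · have h1 : (arr.drop i.toNat).length ≤ 1 := by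
          rw [List.length_drop]; omega
        have hg0 : gpairs (arr.drop i.toNat) = 0 := by
          match hh : arr.drop i.toNat with
          | [] => simp [gpairs]
          | [x] => simp [gpairs]
          | a :: b :: rest => rw [hh] at h1; simp at h1
        have hcap0 : 0 ≤ PySem.Int.floordiv (arr.length : Int) 4 - tb := by omega
        rw [hg0]
        omega

-- ===== VERDICT (by name: the statement is the Claim_ definition above) =====
theorem findlow_spec : Claim_equal_findlow := by
  intro arr _
  unfold Spec_findlow findlow findlow_alt
  have hcap : (0 : Int) ≤ PySem.Int.floordiv (arr.length : Int) 4 := by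
    rw [PySem.Int.floordiv_eq_ediv_of_pos (by norm_num)]
    exact Int.ediv_nonneg (by positivity) (by norm_num)
  show findlowLoop arr (arr.length : Int) (arr.count 1) 0 0 = _
  rw [findlowLoop_eq arr ((arr.length : Int) - 0).toNat 0 0 _ rfl le_rfl le_rfl hcap]
  have hp := pairs_split arr
  simp only [List.splitOn] at hp
  simp [pysem, List.splitOn] at hp ⊢
  rw [hp]
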